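-- pv_equiv track=rewrite | github.com/mmahmud97/ppmi-parkinsons-classification | subset_validator.py | choose_key_columns
-- ===== SOURCE A (Python) =====
-- from typing import Dict, List, Optional, Sequence, Tuple
--
-- def choose_key_columns(cols: Sequence[str]) -> List[str]:
--     """Heuristic selection of key columns for row-level checks."""
--     candidates = [
--         ["PATNO", "EVENT_ID"],
--         ["PATNO", "REC_ID"],
--         ["PATNO"],
--         ["REC_ID"],
--     ]
--     colset = set(cols)
--     for cand in candidates:
--         if all(c in colset for c in cand):
--             return cand
--     return []  # fall back to row-count-only checks
-- ===== SOURCE B (Python) =====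
-- from typing import List, Sequence
--
-- _TAG = {"PATNO": 1, "EVENT_ID": 2, "REC_ID": 4}
-- # table[mask] for mask = PATNO*1 | EVENT_ID*2 | REC_ID*4
-- _TABLE = [[], ["PATNO"], [], ["PATNO", "EVENT_ID"],
--           ["REC_ID"], ["PATNO", "REC_ID"], ["REC_ID"], ["PATNO", "EVENT_ID"]]
--
-- def choose_key_columns(cols: Sequence[str]) -> List[str]:
--     """Heuristic selection of key columns for row-level checks."""
--     mask = 0
--     for c in cols:
--         mask |= _TAG.get(c, 0)
--     return list(_TABLE[mask])
-- ===== Notes on version B (the rewrite author's own statement) =====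
-- stated objective: alternative
-- what changed: Replaced the first-match candidate-list loop with a single fold that ORs a presence bitmask of the three relevant columns, then decodes the answer from a precomputed 8-entry lookup table.
import Mathlib
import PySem

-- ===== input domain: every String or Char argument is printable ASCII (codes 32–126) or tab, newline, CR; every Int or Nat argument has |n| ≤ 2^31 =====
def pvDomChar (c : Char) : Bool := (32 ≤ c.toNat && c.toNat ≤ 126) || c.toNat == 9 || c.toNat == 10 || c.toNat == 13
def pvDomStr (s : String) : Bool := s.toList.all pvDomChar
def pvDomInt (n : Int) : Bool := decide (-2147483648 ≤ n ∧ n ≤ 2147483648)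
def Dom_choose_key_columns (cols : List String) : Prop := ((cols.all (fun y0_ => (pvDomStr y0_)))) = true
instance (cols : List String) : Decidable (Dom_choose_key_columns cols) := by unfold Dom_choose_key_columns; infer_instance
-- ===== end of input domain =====

-- B replaces A's first-match candidate loop by one fold building a presence bitmask plus an 8-entry lookup table (alternative decomposition).
-- ===== PORT A =====
def cklA_loop (colset : List String) : List (List String) → List String
  | [] => []
  | cand :: rest => if cand.all (fun c => colset.contains c) then cand else cklA_loop colset rest

def choose_key_columns (cols : List String) : List String :=
  cklA_loop (PySem.Set.ofList cols)
    [["PATNO", "EVENT_ID"], ["PATNO", "REC_ID"], ["PATNO"], ["REC_ID"]]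

-- ===== PORT B =====
def cklTag (c : String) : Nat :=
  PySem.Dict.getD (PySem.Dict.ofList [("PATNO", 1), ("EVENT_ID", 2), ("REC_ID", 4)]) c 0

def cklTable : List (List String) :=
  [[], ["PATNO"], [], ["PATNO", "EVENT_ID"],
   ["REC_ID"], ["PATNO", "REC_ID"], ["REC_ID"], ["PATNO", "EVENT_ID"]]

def choose_key_columns_alt (cols : List String) : List String :=
  cklTable.getD (cols.foldl (fun a c => a ||| cklTag c) 0) []

-- ===== PRECONDITION & SPEC =====
def Spec_choose_key_columns (cols : List String) (out : List String) : Prop := out = choose_key_columns_alt cols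
instance (cols : List String) (out : List String) : Decidable (Spec_choose_key_columns cols out) := by unfold Spec_choose_key_columns; infer_instance

-- ===== CLAIM (what is proved, stated in full; the proofs are below) =====
def Claim_equal_choose_key_columns : Prop := ∀ (cols : List String), Dom_choose_key_columns cols → Spec_choose_key_columns cols (choose_key_columns cols)

-- ===== LEMMAS AND PROOFS =====
def cklEnc (cols : List String) : Nat :=
  (if "PATNO" ∈ cols then 1 else 0) ||| (if "EVENT_ID" ∈ cols then 2 else 0) |||
    (if "REC_ID" ∈ cols then 4 else 0)

theorem cklTag_other (c : String) (h1 : c ≠ "PATNO") (h2 : c ≠ "EVENT_ID")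
    (h3 : c ≠ "REC_ID") : cklTag c = 0 := by
  have b1 : ("PATNO" == c) = false := beq_eq_false_iff_ne.mpr (Ne.symm h1)
  have b2 : ("EVENT_ID" == c) = false := beq_eq_false_iff_ne.mpr (Ne.symm h2)
  have b3 : ("REC_ID" == c) = false := beq_eq_false_iff_ne.mpr (Ne.symm h3)
  simp [cklTag, PySem.Dict.getD, PySem.Dict.ofList, PySem.Dict.update, PySem.Dict.insert,
    PySem.Dict.get?, PySem.Dict.empty, PySem.Dict.contains, b1, b2, b3]

theorem cklEnc_cons (c : String) (t : List String) :
    cklEnc (c :: t) = cklTag c ||| cklEnc t := by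
  unfold cklEnc
  by_cases h1 : c = "PATNO" <;> by_cases h2 : c = "EVENT_ID" <;> by_cases h3 : c = "REC_ID" <;>
    simp_all [cklTag_other, eq_comm] <;>
    by_cases p : "PATNO" ∈ t <;> by_cases e : "EVENT_ID" ∈ t <;> by_cases r : "REC_ID" ∈ t <;>
    simp_all [cklTag] <;> rfl

theorem ckl_fold (cols : List String) (acc : Nat) :
    cols.foldl (fun a c => a ||| cklTag c) acc = acc ||| cklEnc cols := by
  induction cols generalizing acc with
  | nil => simp [cklEnc]
  | cons c t ih =>
    simp only [List.foldl_cons, ih, cklEnc_cons, Nat.or_assoc]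

-- ===== VERDICT (by name: the statement is the Claim_ definition above) =====
theorem choose_key_columns_spec : Claim_equal_choose_key_columns := by
  intro cols _
  unfold Spec_choose_key_columns choose_key_columns choose_key_columns_alt
  rw [ckl_fold]
  simp only [cklA_loop, List.all_cons, List.all_nil, Bool.and_true,
    Nat.zero_or, cklEnc]
  by_cases hp : "PATNO" ∈ cols <;> by_cases he : "EVENT_ID" ∈ cols <;>
    by_cases hr : "REC_ID" ∈ cols <;> simp [hp, he, hr, cklTable]
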